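-- pv_equiv track=rewrite | github.com/bohui/real2ai | backend/app/services/document_service.py | _determine_primary_content_type
-- ===== SOURCE A (Python) =====
-- from typing import Dict, Any, Optional, BinaryIO, List
--
-- def _determine_primary_content_type(content_types: List[str]) -> str:
--     """Determine primary content type for a page"""
--
--     # Priority order for content types
--     priority = {
--         "diagram": "diagram",
--         "image": "diagram",
--         "table": "table",
--         "signature": "signature",
--         "text": "text",
--         "body": "text",
--         "header": "text",
--         "footer": "text"
--     }
--
--     for content_type in priority.keys():
--         if content_type in content_types:
--             return priority[content_type]
--
--     return "mixed" if content_types else "empty"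
-- ===== SOURCE B (Python) =====
-- def _determine_primary_content_type(content_types):
--     """Determine primary content type for a page"""
--     rank = {"diagram": 0, "image": 1, "table": 2, "signature": 3,
--             "text": 4, "body": 5, "header": 6, "footer": 7}
--     labels = ["diagram", "diagram", "table", "signature",
--               "text", "text", "text", "text"]
--     best = None
--     for ct in content_types:
--         r = rank.get(ct)
--         if r is not None and (best is None or r < best):
--             best = r
--     if best is not None:
--         return labels[best]
--     return "mixed" if content_types else "empty"
-- ===== Notes on version B (the rewrite author's own statement) =====
-- stated objective: alternative
-- what changed: Instead of scanning the fixed priority order and testing membership of each key in the list (8 passes over the input), B makes one pass over the input list maintaining the minimum rank of any recognised content type, then maps that rank to its label.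
import Mathlib
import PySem

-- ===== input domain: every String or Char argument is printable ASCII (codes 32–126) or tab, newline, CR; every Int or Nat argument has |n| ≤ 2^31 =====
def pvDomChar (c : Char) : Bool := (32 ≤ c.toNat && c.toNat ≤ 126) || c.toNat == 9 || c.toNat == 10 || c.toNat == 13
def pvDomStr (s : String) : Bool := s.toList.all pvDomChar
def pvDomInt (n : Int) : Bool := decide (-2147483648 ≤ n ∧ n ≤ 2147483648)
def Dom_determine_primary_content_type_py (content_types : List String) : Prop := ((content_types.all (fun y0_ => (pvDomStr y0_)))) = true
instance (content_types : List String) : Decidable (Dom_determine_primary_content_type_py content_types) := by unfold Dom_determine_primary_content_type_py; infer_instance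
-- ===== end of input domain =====

-- B replaces A's 8 membership scans of the priority order by one pass over the
-- input list that keeps the minimum-rank recognised content type (alternative decomposition).


-- ===== PORT A =====
-- the priority dict of A, as its (key, label) items in insertion order
def pvPriorityItems : List (String × String) :=
  [("diagram","diagram"),("image","diagram"),("table","table"),("signature","signature"),
   ("text","text"),("body","text"),("header","text"),("footer","text")]

-- the `for content_type in priority.keys(): if content_type in content_types: return ...` loop
def pvAScan (pairs : List (String × String)) (content_types : List String) : Option String :=
  match pairs with
  | [] => none
  | (k, v) :: rest => if k ∈ content_types then some v else pvAScan rest content_types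

def determine_primary_content_type_py (content_types : List String) : String :=
  match pvAScan pvPriorityItems content_types with
  | some v => v
  | none => if content_types = [] then "empty" else "mixed"

-- ===== PORT B =====
-- rank.get(ct): the rank dict lookup
def pvRank (s : String) : Option Nat :=
  if s = "diagram" then some 0 else if s = "image" then some 1
  else if s = "table" then some 2 else if s = "signature" then some 3
  else if s = "text" then some 4 else if s = "body" then some 5
  else if s = "header" then some 6 else if s = "footer" then some 7 else none

-- one iteration of B's loop: update the running minimum rank
def pvStep (best : Option Nat) (ct : String) : Option Nat :=
  match pvRank ct with
  | none => best
  | some r =>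
    match best with
    | none => some r
    | some b => if r < b then some r else some b

def pvLabels : List String := ["diagram","diagram","table","signature","text","text","text","text"]

def determine_primary_content_type_py_alt (content_types : List String) : String :=
  match content_types.foldl pvStep none with
  | some b => pvLabels.getD b "mixed"
  | none => if content_types = [] then "empty" else "mixed"

-- ===== PRECONDITION & SPEC =====
def Spec_determine_primary_content_type_py (content_types : List String) (out : String) : Prop := out = determine_primary_content_type_py_alt content_types
instance (content_types : List String) (out : String) : Decidable (Spec_determine_primary_content_type_py content_types out) := by unfold Spec_determine_primary_content_type_py; infer_instance

-- ===== CLAIM (what is proved, stated in full; the proofs are below) =====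
def Claim_equal_determine_primary_content_type_py : Prop := ∀ (content_types : List String), Dom_determine_primary_content_type_py content_types → Spec_determine_primary_content_type_py content_types (determine_primary_content_type_py content_types)

-- ===== LEMMAS AND PROOFS =====

-- a rank can only come from the eight priority keys
lemma pvRank_some (s : String) (r : Nat) (h : pvRank s = some r) :
    (r = 0 ∧ s = "diagram") ∨ (r = 1 ∧ s = "image") ∨ (r = 2 ∧ s = "table") ∨
    (r = 3 ∧ s = "signature") ∨ (r = 4 ∧ s = "text") ∨ (r = 5 ∧ s = "body") ∨
    (r = 6 ∧ s = "header") ∨ (r = 7 ∧ s = "footer") := by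
  unfold pvRank at h
  split_ifs at h <;> simp_all

-- one step attains either the accumulator or the element's rank
lemma pvStep_cases (acc : Option Nat) (s : String) (r : Nat) (h : pvStep acc s = some r) :
    acc = some r ∨ pvRank s = some r := by
  unfold pvStep at h
  cases hrk : pvRank s with
  | none => rw [hrk] at h; exact Or.inl h
  | some v =>
    rw [hrk] at h
    cases acc with
    | none =>
      have hv : v = r := by simpa using h
      subst hv; exact Or.inr rfl
    | some b =>
      by_cases hvb : v < b
      · have hv : v = r := by simpa [hvb] using h
        subst hv; exact Or.inr rfl
      · have hb : b = r := by simpa [hvb] using h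
        subst hb; exact Or.inl rfl

-- the fold result is the rank of some element (or the initial accumulator)
lemma pvFold_mem (l : List String) : ∀ (acc : Option Nat) (r : Nat),
    l.foldl pvStep acc = some r → acc = some r ∨ ∃ s ∈ l, pvRank s = some r := by
  induction l with
  | nil => intro acc r h; exact Or.inl h
  | cons a t ih =>
    intro acc r h
    rw [List.foldl_cons] at h
    rcases ih _ _ h with hacc | ⟨s, hs, hr⟩
    · rcases pvStep_cases acc a r hacc with h1 | h1
      · exact Or.inl h1
      · exact Or.inr ⟨a, List.mem_cons_self .., h1⟩
    · exact Or.inr ⟨s, List.mem_cons_of_mem _ hs, hr⟩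

-- a some accumulator can only go down
lemma pvFold_mono (l : List String) : ∀ (b : Nat),
    ∃ r, l.foldl pvStep (some b) = some r ∧ r ≤ b := by
  induction l with
  | nil => intro b; exact ⟨b, rfl, le_refl b⟩
  | cons a t ih =>
    intro b
    rw [List.foldl_cons]
    unfold pvStep
    cases hrk : pvRank a
    · exact ih b
    · case some r' =>
      by_cases hlt : r' < b
      · simp only [hlt, if_true]
        obtain ⟨r, h, hle⟩ := ih r'
        exact ⟨r, h, le_trans hle (le_of_lt hlt)⟩
      · simp only [hlt, if_false]
        exact ih b
-- a recognised element bounds the fold result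
lemma pvFold_le (s : String) (r : Nat) (hr : pvRank s = some r) :
    ∀ (l : List String) (acc : Option Nat), s ∈ l →
    ∃ r', l.foldl pvStep acc = some r' ∧ r' ≤ r := by
  intro l
  induction l with
  | nil => intro acc hs; cases hs
  | cons a t ih =>
    intro acc hs
    rw [List.foldl_cons]
    rcases List.mem_cons.mp hs with rfl | hmem
    · have hstep : ∃ r'', pvStep acc s = some r'' ∧ r'' ≤ r := by
        unfold pvStep
        rw [hr]
        cases acc with
        | none => exact ⟨r, rfl, le_refl r⟩
        | some b =>
          by_cases hlt : r < b
          · simp only [hlt, if_true]; exact ⟨r, rfl, le_refl r⟩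
          · simp only [hlt, if_false]; exact ⟨b, rfl, Nat.le_of_not_lt hlt⟩
      obtain ⟨r'', h2, hle2⟩ := hstep
      rw [h2]
      obtain ⟨r3, h3, hle3⟩ := pvFold_mono t r''
      exact ⟨r3, h3, le_trans hle3 hle2⟩
    · exact ih _ hmem

-- ===== VERDICT (by name: the statement is the Claim_ definition above) =====
theorem determine_primary_content_type_py_spec : Claim_equal_determine_primary_content_type_py := by
  intro l _
  unfold Spec_determine_primary_content_type_py
  by_cases h0 : "diagram" ∈ l
  · obtain ⟨r', hf, hle⟩ := pvFold_le "diagram" 0 (by decide) l none h0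
    have hrk : r' = 0 := by
      rcases pvFold_mem l none r' hf with h | ⟨s, hs, hrk⟩
      · simp at h
      · rcases pvRank_some s r' hrk with ⟨hr, hsn⟩|⟨hr, hsn⟩|⟨hr, hsn⟩|⟨hr, hsn⟩|⟨hr, hsn⟩|⟨hr, hsn⟩|⟨hr, hsn⟩|⟨hr, hsn⟩ <;>
          subst hsn <;> omega
    subst hrk
    simp [determine_primary_content_type_py, pvAScan, pvPriorityItems,
          determine_primary_content_type_py_alt, pvLabels, hf, h0]
  by_cases h1 : "image" ∈ l
  · obtain ⟨r', hf, hle⟩ := pvFold_le "image" 1 (by decide) l none h1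
    have hrk : r' = 1 := by
      rcases pvFold_mem l none r' hf with h | ⟨s, hs, hrk⟩
      · simp at h
      · rcases pvRank_some s r' hrk with ⟨hr, hsn⟩|⟨hr, hsn⟩|⟨hr, hsn⟩|⟨hr, hsn⟩|⟨hr, hsn⟩|⟨hr, hsn⟩|⟨hr, hsn⟩|⟨hr, hsn⟩ <;>
          subst hsn <;> first | omega | contradiction
    subst hrk
    simp [determine_primary_content_type_py, pvAScan, pvPriorityItems,
          determine_primary_content_type_py_alt, pvLabels, hf, h0, h1]
  by_cases h2 : "table" ∈ l
  · obtain ⟨r', hf, hle⟩ := pvFold_le "table" 2 (by decide) l none h2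
    have hrk : r' = 2 := by
      rcases pvFold_mem l none r' hf with h | ⟨s, hs, hrk⟩
      · simp at h
      · rcases pvRank_some s r' hrk with ⟨hr, hsn⟩|⟨hr, hsn⟩|⟨hr, hsn⟩|⟨hr, hsn⟩|⟨hr, hsn⟩|⟨hr, hsn⟩|⟨hr, hsn⟩|⟨hr, hsn⟩ <;>
          subst hsn <;> first | omega | contradiction
    subst hrk
    simp [determine_primary_content_type_py, pvAScan, pvPriorityItems,
          determine_primary_content_type_py_alt, pvLabels, hf, h0, h1, h2]
  by_cases h3 : "signature" ∈ l
  · obtain ⟨r', hf, hle⟩ := pvFold_le "signature" 3 (by decide) l none h3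
    have hrk : r' = 3 := by
      rcases pvFold_mem l none r' hf with h | ⟨s, hs, hrk⟩
      · simp at h
      · rcases pvRank_some s r' hrk with ⟨hr, hsn⟩|⟨hr, hsn⟩|⟨hr, hsn⟩|⟨hr, hsn⟩|⟨hr, hsn⟩|⟨hr, hsn⟩|⟨hr, hsn⟩|⟨hr, hsn⟩ <;>
          subst hsn <;> first | omega | contradiction
    subst hrk
    simp [determine_primary_content_type_py, pvAScan, pvPriorityItems,
          determine_primary_content_type_py_alt, pvLabels, hf, h0, h1, h2, h3]
  by_cases h4 : "text" ∈ l
  · obtain ⟨r', hf, hle⟩ := pvFold_le "text" 4 (by decide) l none h4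
    have hrk : r' = 4 := by
      rcases pvFold_mem l none r' hf with h | ⟨s, hs, hrk⟩
      · simp at h
      · rcases pvRank_some s r' hrk with ⟨hr, hsn⟩|⟨hr, hsn⟩|⟨hr, hsn⟩|⟨hr, hsn⟩|⟨hr, hsn⟩|⟨hr, hsn⟩|⟨hr, hsn⟩|⟨hr, hsn⟩ <;>
          subst hsn <;> first | omega | contradiction
    subst hrk
    simp [determine_primary_content_type_py, pvAScan, pvPriorityItems,
          determine_primary_content_type_py_alt, pvLabels, hf, h0, h1, h2, h3, h4]
  by_cases h5 : "body" ∈ l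
  · obtain ⟨r', hf, hle⟩ := pvFold_le "body" 5 (by decide) l none h5
    have hrk : r' = 5 := by
      rcases pvFold_mem l none r' hf with h | ⟨s, hs, hrk⟩
      · simp at h
      · rcases pvRank_some s r' hrk with ⟨hr, hsn⟩|⟨hr, hsn⟩|⟨hr, hsn⟩|⟨hr, hsn⟩|⟨hr, hsn⟩|⟨hr, hsn⟩|⟨hr, hsn⟩|⟨hr, hsn⟩ <;>
          subst hsn <;> first | omega | contradiction
    subst hrk
    simp [determine_primary_content_type_py, pvAScan, pvPriorityItems,
          determine_primary_content_type_py_alt, pvLabels, hf, h0, h1, h2, h3, h4, h5]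
  by_cases h6 : "header" ∈ l
  · obtain ⟨r', hf, hle⟩ := pvFold_le "header" 6 (by decide) l none h6
    have hrk : r' = 6 := by
      rcases pvFold_mem l none r' hf with h | ⟨s, hs, hrk⟩
      · simp at h
      · rcases pvRank_some s r' hrk with ⟨hr, hsn⟩|⟨hr, hsn⟩|⟨hr, hsn⟩|⟨hr, hsn⟩|⟨hr, hsn⟩|⟨hr, hsn⟩|⟨hr, hsn⟩|⟨hr, hsn⟩ <;>
          subst hsn <;> first | omega | contradiction
    subst hrk
    simp [determine_primary_content_type_py, pvAScan, pvPriorityItems,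
          determine_primary_content_type_py_alt, pvLabels, hf, h0, h1, h2, h3, h4, h5, h6]
  by_cases h7 : "footer" ∈ l
  · obtain ⟨r', hf, hle⟩ := pvFold_le "footer" 7 (by decide) l none h7
    have hrk : r' = 7 := by
      rcases pvFold_mem l none r' hf with h | ⟨s, hs, hrk⟩
      · simp at h
      · rcases pvRank_some s r' hrk with ⟨hr, hsn⟩|⟨hr, hsn⟩|⟨hr, hsn⟩|⟨hr, hsn⟩|⟨hr, hsn⟩|⟨hr, hsn⟩|⟨hr, hsn⟩|⟨hr, hsn⟩ <;>
          subst hsn <;> first | omega | contradiction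
    subst hrk
    simp [determine_primary_content_type_py, pvAScan, pvPriorityItems,
          determine_primary_content_type_py_alt, pvLabels, hf, h0, h1, h2, h3, h4, h5, h6, h7]
  cases hf : l.foldl pvStep none with
  | some r' =>
    exfalso
    rcases pvFold_mem l none r' hf with h | ⟨s, hs, hrk⟩
    · simp at h
    · rcases pvRank_some s r' hrk with ⟨hr, hsn⟩|⟨hr, hsn⟩|⟨hr, hsn⟩|⟨hr, hsn⟩|⟨hr, hsn⟩|⟨hr, hsn⟩|⟨hr, hsn⟩|⟨hr, hsn⟩ <;>
        subst hsn <;> contradiction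
  | none =>
    simp [determine_primary_content_type_py, pvAScan, pvPriorityItems,
          determine_primary_content_type_py_alt, hf, h0, h1, h2, h3, h4, h5, h6, h7]
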